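-- pv_equiv track=rewrite | github.com/irintai-iatniri/srt_library | phase_state_benchmarks2.py | decode_multi_token
-- ===== SOURCE A (Python) =====
-- def decode_multi_token(values, bits_per_token, mapping):
--     """Decode multi-node encoding back to text."""
--     inv = {}
--     for ch, code in mapping.items():
--         key = tuple(1 if v >= 0 else -1 for v in code)
--         inv[key] = ch
--     result = []
--     for i in range(0, len(values) - bits_per_token + 1, bits_per_token):
--         chunk = tuple(1 if values[i + b] >= 0 else -1 for b in range(bits_per_token))
--         result.append(inv.get(chunk, '?'))
--     return "".join(result)
-- ===== SOURCE B (Python) =====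
-- def _signs(nums):
--     return [1 if v >= 0 else -1 for v in nums]
--
--
-- def decode_multi_token(values, bits_per_token, mapping):
--     """Decode sign-encoded values back to text; later mapping entries take precedence."""
--     def char_for(chunk):
--         pattern = _signs(chunk)
--         for ch, code in reversed(mapping.items()):
--             if _signs(code) == pattern:
--                 return ch
--         return '?'
--     return "".join(char_for(values[i:i + bits_per_token])
--                    for i in range(0, len(values) - bits_per_token + 1, bits_per_token))
-- ===== Notes on version B (the rewrite author's own statement) =====
-- stated objective: simpler
-- what changed: B builds no inverse index at all: it slices the values into chunks and resolves each chunk by scanning the mapping from its most recent entry with an early return on the first sign-pattern match (later entries take precedence, '?' if none), where A precomputes an inverse dict and looks chunks up in it.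
import Mathlib
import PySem

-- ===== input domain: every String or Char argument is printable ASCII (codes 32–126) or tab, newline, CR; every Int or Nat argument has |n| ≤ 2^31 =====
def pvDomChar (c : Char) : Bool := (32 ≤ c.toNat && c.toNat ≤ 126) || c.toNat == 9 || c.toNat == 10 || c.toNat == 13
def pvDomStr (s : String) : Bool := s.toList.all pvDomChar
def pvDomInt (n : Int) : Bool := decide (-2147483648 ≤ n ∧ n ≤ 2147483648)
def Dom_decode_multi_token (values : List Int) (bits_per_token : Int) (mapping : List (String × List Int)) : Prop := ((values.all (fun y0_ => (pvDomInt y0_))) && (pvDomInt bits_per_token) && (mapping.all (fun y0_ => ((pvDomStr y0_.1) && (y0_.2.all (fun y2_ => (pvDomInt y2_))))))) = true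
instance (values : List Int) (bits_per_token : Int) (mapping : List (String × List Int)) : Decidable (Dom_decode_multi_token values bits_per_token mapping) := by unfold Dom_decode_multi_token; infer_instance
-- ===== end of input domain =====

-- B drops A's precomputed inverse dict: it slices the values into chunks and resolves each chunk by a first-match scan of the mapping from its most recent entry (later entries take precedence), defaulting to '?'.


-- ===== PORT A =====
-- values[i+b] is provably in range on every executed iteration, so pyGetD's default 0 is never used
def decode_multi_token (values : List Int) (bits_per_token : Int) (mapping : List (String × List Int)) : String :=
  let inv : PySem.Dict (List Int) String :=
    mapping.foldl (fun d p => d.insert (p.2.map (fun v => if 0 ≤ v then (1 : Int) else -1)) p.1) PySem.Dict.empty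
  let result : List String :=
    (PySem.List.pyRange 0 ((values.length : Int) - bits_per_token + 1) bits_per_token).foldl
      (fun acc i =>
        acc ++ [inv.getD ((PySem.List.pyRange 0 bits_per_token 1).map
          (fun b => if 0 ≤ PySem.List.pyGetD values (i + b) 0 then (1 : Int) else -1)) "?"]) []
  PySem.Str.join "" result

-- ===== PORT B =====
def pvSigns (nums : List Int) : List Int := nums.map (fun v => if 0 ≤ v then (1 : Int) else -1)

-- the 'for … return ch / return ?' loop over reversed(mapping.items()) is find? on the reversed list
def pvCharFor (mapping : List (String × List Int)) (chunk : List Int) : String :=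
  let pattern := pvSigns chunk
  match mapping.reverse.find? (fun p => pvSigns p.2 == pattern) with
  | some p => p.1
  | none => "?"

def decode_multi_token_alt (values : List Int) (bits_per_token : Int) (mapping : List (String × List Int)) : String :=
  PySem.Str.join ""
    ((PySem.List.pyRange 0 ((values.length : Int) - bits_per_token + 1) bits_per_token).map
      (fun i => pvCharFor mapping (PySem.List.slice values (some i) (some (i + bits_per_token)))))

-- ===== PRECONDITION & SPEC =====
-- Python's range raises ValueError when its step is zero, so A raises exactly when bits_per_token = 0.
def Pre_decode_multi_token (_values : List Int) (bits_per_token : Int) (_mapping : List (String × List Int)) : Prop := bits_per_token ≠ 0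
instance (values : List Int) (bits_per_token : Int) (mapping : List (String × List Int)) : Decidable (Pre_decode_multi_token values bits_per_token mapping) := by unfold Pre_decode_multi_token; infer_instance

def pvWitness_decode_multi_token : List Int × Int × (List (String × List Int)) := ([3, -2], 1, [("a", [5]), ("b", [-3])])

def Spec_decode_multi_token (values : List Int) (bits_per_token : Int) (mapping : List (String × List Int)) (out : String) : Prop := out = decode_multi_token_alt values bits_per_token mapping
instance (values : List Int) (bits_per_token : Int) (mapping : List (String × List Int)) (out : String) : Decidable (Spec_decode_multi_token values bits_per_token mapping out) := by unfold Spec_decode_multi_token; infer_instance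

-- ===== CLAIM (what is proved, stated in full; the proofs are below) =====
def Claim_equal_decode_multi_token : Prop := ∀ (values : List Int) (bits_per_token : Int) (mapping : List (String × List Int)), Dom_decode_multi_token values bits_per_token mapping → Pre_decode_multi_token values bits_per_token mapping → Spec_decode_multi_token values bits_per_token mapping (decode_multi_token values bits_per_token mapping)

-- ===== LEMMAS AND PROOFS =====
-- appending singletons in a fold is mapping
theorem pv_foldl_push {α β : Type} (l : List α) (f : α → β) (acc : List β) :
    l.foldl (fun acc i => acc ++ [f i]) acc = acc ++ l.map f := by
  induction l generalizing acc with
  | nil => simp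
  | cons x rest ih => simp [List.foldl_cons, ih]

-- a range with negative step and stop above start is empty
theorem pv_pyRange_neg_nil (a b s : Int) (hs : s < 0) (hab : a ≤ b) :
    PySem.List.pyRange a b s = [] := by
  simp only [PySem.List.pyRange]
  rw [if_neg (by omega)]
  rw [if_neg (by omega), if_neg (by omega)]
  simp

-- lookup in the overwrite-built inverse dict = first match scanning the reversed association list
theorem pv_getD_fold_insert (l : List (String × List Int)) (d : PySem.Dict (List Int) String) (k : List Int) :
    (l.foldl (fun d p => d.insert (p.2.map (fun v => if 0 ≤ v then (1 : Int) else -1)) p.1) d).getD k "?"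
      = match l.reverse.find? (fun p => pvSigns p.2 == k) with
        | some p => p.1
        | none => d.getD k "?" := by
  induction l generalizing d with
  | nil => simp
  | cons p rest ih =>
      simp only [List.foldl_cons, List.reverse_cons, List.find?_append]
      rw [ih]
      cases rest.reverse.find? (fun p => pvSigns p.2 == k) with
      | some q => simp
      | none =>
          simp only [Option.none_or, pvSigns]
          rw [PySem.Dict.getD_insert]
          by_cases h : p.2.map (fun v => if 0 ≤ v then (1 : Int) else -1) = k
          · simp [h, List.find?]
          · have hb : (List.map (fun v => if 0 ≤ v then (1 : Int) else -1) p.2 == k) = false :=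
              beq_eq_false_iff_ne.mpr h
            simp [List.find?, hb]
            exact fun hkk => absurd hkk.symm h

-- A's per-chunk sign tuple equals the sign map of B's slice, on executed iterations
theorem pv_chunk_eq (values : List Int) (k i : Int) (hk : 0 < k) (hi : 0 ≤ i)
    (hik : i + k ≤ (values.length : Int)) :
    (PySem.List.pyRange 0 k 1).map
        (fun b => if 0 ≤ PySem.List.pyGetD values (i + b) 0 then (1 : Int) else -1)
      = pvSigns (PySem.List.slice values (some i) (some (i + k))) := by
  rw [PySem.List.slice_toNat values (a := i) (b := i + k) hi (by omega)]
  unfold pvSigns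
  apply List.ext_getElem
  · simp [PySem.List.length_pyRange_one]
    omega
  · intro j h1 h2
    have hj : (j : Int) < k := by
      have := h1
      simp [PySem.List.length_pyRange_one] at this
      omega
    simp only [List.getElem_map, List.getElem_take, List.getElem_drop]
    rw [PySem.List.getElem_pyRange_one]
    rw [PySem.List.pyGetD_eq_getElem values 0 (by omega) (by omega)]
    simp only [show (i + (j : Int)).toNat = i.toNat + j from by omega, zero_add]

theorem decode_multi_token_spec : Claim_equal_decode_multi_token := by
  intro values k mapping _ hk0
  unfold Spec_decode_multi_token decode_multi_token decode_multi_token_alt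
  dsimp only
  rw [pv_foldl_push, List.nil_append]
  rcases lt_or_gt_of_ne hk0 with hneg | hpos
  · rw [pv_pyRange_neg_nil 0 ((values.length : Int) - k + 1) k hneg (by omega)]
    simp
  · congr 1
    apply List.map_congr_left
    intro i hi
    rw [PySem.List.mem_pyRange_iff_of_pos hpos] at hi
    obtain ⟨h0, h1, -⟩ := hi
    rw [pv_chunk_eq values k i hpos h0 (by omega)]
    rw [pv_getD_fold_insert]
    unfold pvCharFor
    simp [PySem.Dict.getD_empty]
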